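-- pv_equiv track=rewrite | github.com/hemanth506/Scaler-DSA | Scalar/live-sessions/Assignment/12 - carry-forward/bulbs.py | bulbsN
-- ===== SOURCE A (Python) =====
-- def bulbsN(A):
--     N = len(A)
--
--     c = 0
--     state_flow = 1
--     for i in range(N):
--         if A[i] != state_flow:
--             c += 1
--         state_flow = A[i]
--     return c
-- ===== SOURCE B (Python) =====
-- def bulbsN(A):
--     # Grouping decomposition: collapse A into its runs (consecutive duplicates removed),
--     # then the number of presses is the number of runs, minus one if the first run is
--     # already in the initial state 1.
--     runs = []
--     for x in A:
--         if not runs or runs[-1] != x: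
--             runs.append(x)
--     return len(runs) - (len(runs) > 0 and runs[0] == 1)
-- ===== Notes on version B (the rewrite author's own statement) =====
-- stated objective: alternative
-- what changed: Instead of counting mismatches against a running previous-state variable, B collapses the list into its runs of equal values and returns the run count, minus one when the first run already equals the initial state 1.
import Mathlib
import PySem

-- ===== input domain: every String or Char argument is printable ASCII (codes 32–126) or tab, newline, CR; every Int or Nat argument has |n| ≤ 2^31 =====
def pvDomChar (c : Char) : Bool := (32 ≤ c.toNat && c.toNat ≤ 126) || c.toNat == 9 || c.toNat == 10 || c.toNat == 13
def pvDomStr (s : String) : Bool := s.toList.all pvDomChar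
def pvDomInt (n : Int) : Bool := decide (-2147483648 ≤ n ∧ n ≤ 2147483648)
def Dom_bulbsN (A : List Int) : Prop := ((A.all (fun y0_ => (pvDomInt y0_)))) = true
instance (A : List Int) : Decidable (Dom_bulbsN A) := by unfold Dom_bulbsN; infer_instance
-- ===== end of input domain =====

-- ===== PORT A =====
-- B groups the list into runs and counts them (adjusting for an initial run of 1s),
-- instead of A's mismatch count against a running previous-state variable; same O(n) cost.
def bulbsN (A : List Int) : Int :=
  (A.foldl (fun (st : Int × Int) => fun a => (if a ≠ st.2 then st.1 + 1 else st.1, a)) (0, 1)).1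

-- ===== PORT B =====
def bulbsN_alt (A : List Int) : Int :=
  let runs := A.foldl (fun (rs : List Int) x =>
    if rs = [] ∨ rs.getLast? ≠ some x then rs ++ [x] else rs) []
  (runs.length : Int) - (if runs.length > 0 ∧ runs.head? = some 1 then 1 else 0)

-- ===== PRECONDITION & SPEC =====
def Spec_bulbsN (A : List Int) (out : Int) : Prop := out = bulbsN_alt A
instance (A : List Int) (out : Int) : Decidable (Spec_bulbsN A out) := by unfold Spec_bulbsN; infer_instance

-- ===== CLAIM (what is proved, stated in full; the proofs are below) =====
def Claim_equal_bulbsN : Prop := ∀ (A : List Int), Dom_bulbsN A → Spec_bulbsN A (bulbsN A)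

-- ===== LEMMAS AND PROOFS =====

-- A's fold counts the adjacent mismatches of the state-prepended list.
lemma bulbsN_fold (A : List Int) (c prev : Int) :
    (A.foldl (fun (st : Int × Int) => fun a => (if a ≠ st.2 then st.1 + 1 else st.1, a)) (c, prev)).1
      = c + (((prev :: A).zip A).countP (fun p => p.1 ≠ p.2) : Nat) := by
  induction A generalizing c prev with
  | nil => simp
  | cons x xs ih =>
    simp only [List.foldl, List.zip_cons_cons, List.countP_cons]
    rw [ih]
    by_cases h : x = prev
    · simp [h]
    · simp [h]; omega

-- B's run-building fold, started from a nonempty accumulator whose last element is prev,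
-- keeps its head, stays nonempty, and grows by exactly the number of adjacent mismatches.
lemma runs_fold (xs : List Int) (rs : List Int) (prev : Int)
    (hne : rs ≠ []) (hlast : rs.getLast? = some prev) :
    (xs.foldl (fun (rs : List Int) x =>
        if rs = [] ∨ rs.getLast? ≠ some x then rs ++ [x] else rs) rs).length
        = rs.length + (((prev :: xs).zip xs).countP (fun p => p.1 ≠ p.2) : Nat)
      ∧ (xs.foldl (fun (rs : List Int) x =>
        if rs = [] ∨ rs.getLast? ≠ some x then rs ++ [x] else rs) rs).head? = rs.head?
      ∧ xs.foldl (fun (rs : List Int) x =>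
        if rs = [] ∨ rs.getLast? ≠ some x then rs ++ [x] else rs) rs ≠ [] := by
  induction xs generalizing rs prev with
  | nil => simp [hne]
  | cons x xs ih =>
    simp only [List.foldl, List.zip_cons_cons, List.countP_cons]
    by_cases h : x = prev
    · subst h
      rw [if_neg (by simp [hne, hlast])]
      obtain ⟨h1, h2, h3⟩ := ih rs x hne hlast
      exact ⟨by rw [h1]; simp, h2, h3⟩
    · rw [if_pos (Or.inr (by simp [hlast]; exact fun he => h he.symm))]
      obtain ⟨h1, h2, h3⟩ := ih (rs ++ [x]) x (by simp) (by simp)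
      refine ⟨by rw [h1]; simp [Ne.symm h]; omega, ?_, h3⟩
      rw [h2]
      cases rs with
      | nil => exact absurd rfl hne
      | cons a as => simp

-- ===== VERDICT (by name: the statement is the Claim_ definition above) =====
theorem bulbsN_spec : Claim_equal_bulbsN := by
  intro A _
  unfold Spec_bulbsN bulbsN bulbsN_alt
  rw [bulbsN_fold]
  cases A with
  | nil => simp
  | cons a xs =>
    have h1 : (a :: xs).foldl (fun (rs : List Int) x =>
        if rs = [] ∨ rs.getLast? ≠ some x then rs ++ [x] else rs) []
        = xs.foldl (fun (rs : List Int) x =>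
        if rs = [] ∨ rs.getLast? ≠ some x then rs ++ [x] else rs) [a] := by
      simp [List.foldl]
    simp only [List.zip_cons_cons, List.countP_cons, h1]
    obtain ⟨hlen, hhead, _⟩ := runs_fold xs [a] a (by simp) (by simp)
    rw [hlen, hhead]
    by_cases h : a = 1
    · simp [h]
    · simp [h, Ne.symm h]
      ring
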